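-- pv_equiv track=rewrite | github.com/hazelybell/estimate-charm | python/testdata/launchpad/lib/lp/services/testing/parallel.py | find_load_list
-- ===== SOURCE A (Python) =====
-- def find_load_list(args):
--     """Get the value passed in to --load-list=FOO."""
--     load_list = None
--     for pos, arg in enumerate(args):
--         if arg.startswith('--load-list='):
--             load_list = arg[len('--load-list='):]
--         if arg == '--load-list':
--             load_list = args[pos+1]
--     return load_list
-- ===== SOURCE B (Python) =====
-- def find_load_list(args):
--     """Get the value passed in to --load-list=FOO."""
--     pos = len(args) - 1
--     while pos >= 0:
--         arg = args[pos]
--         if arg == '--load-list':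
--             return args[pos + 1]
--         if arg.startswith('--load-list='):
--             return arg[len('--load-list='):]
--         pos -= 1
--     return None
-- ===== Notes on version B (the rewrite author's own statement) =====
-- stated objective: alternative
-- what changed: Scans args backwards with an early return on the first match from the end, instead of scanning forward and repeatedly overwriting an accumulator; 'last occurrence wins' becomes 'first hit from the end'.
import Mathlib
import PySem

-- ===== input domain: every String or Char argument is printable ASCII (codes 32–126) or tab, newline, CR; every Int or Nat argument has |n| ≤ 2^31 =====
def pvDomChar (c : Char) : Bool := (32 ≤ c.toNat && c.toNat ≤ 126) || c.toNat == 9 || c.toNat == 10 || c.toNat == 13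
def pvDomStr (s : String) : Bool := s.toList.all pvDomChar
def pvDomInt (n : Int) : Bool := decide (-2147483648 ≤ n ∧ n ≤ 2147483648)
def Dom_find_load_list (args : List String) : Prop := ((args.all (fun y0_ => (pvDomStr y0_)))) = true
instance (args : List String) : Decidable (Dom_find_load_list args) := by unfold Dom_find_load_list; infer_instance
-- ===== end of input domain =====

-- B scans args backwards and returns on the first match from the end, instead of A's forward
-- scan that overwrites an accumulator (objective: alternative decomposition, same cost).


-- ===== PORT A =====
-- forward scan over enumerate(args); args[pos+1] is pyGet? (none = the IndexError excluded by Pre_)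
def find_load_list (args : List String) : Option String :=
  (PySem.List.enumerate args).foldl
    (fun load_list pa =>
      let load_list := if PySem.Str.startswith pa.2 "--load-list=" then
          some (PySem.Str.slice pa.2 (some 12) none) else load_list
      if pa.2 == "--load-list" then PySem.List.pyGet? args (pa.1 + 1) else load_list)
    none

-- ===== PORT B =====
-- B's 'pos = len(args)-1; while pos >= 0: … pos -= 1' as a countdown recursion; argument n is pos+1
def find_load_list_altGo (args : List String) : Nat → Option String
  | 0 => none
  | n+1 =>
    match PySem.List.pyGet? args (n : Int) with
    | none => none    -- unreachable: n < args.length at every call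
    | some arg =>
      if arg == "--load-list" then PySem.List.pyGet? args ((n : Int) + 1)
      else if PySem.Str.startswith arg "--load-list=" then
        some (PySem.Str.slice arg (some 12) none)
      else find_load_list_altGo args n

def find_load_list_alt (args : List String) : Option String :=
  find_load_list_altGo args args.length

-- ===== PRECONDITION & SPEC =====
-- Pre_ excludes exactly the inputs where Python A raises IndexError (args ends with the bare
-- flag '--load-list', so args[pos+1] is out of range); Python B raises the same IndexError there.
def Pre_find_load_list (args : List String) : Prop := args.getLast? ≠ some "--load-list"
instance (args : List String) : Decidable (Pre_find_load_list args) := by unfold Pre_find_load_list; infer_instance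
def pvWitness_find_load_list : List String := ["prog", "--load-list", "foo.list", "--load-list=bar"]
def Spec_find_load_list (args : List String) (out : Option String) : Prop := out = find_load_list_alt args
instance (args : List String) (out : Option String) : Decidable (Spec_find_load_list args out) := by unfold Spec_find_load_list; infer_instance

-- ===== CLAIM (what is proved, stated in full; the proofs are below) =====
def Claim_equal_find_load_list : Prop := ∀ (args : List String), Dom_find_load_list args → Pre_find_load_list args → Spec_find_load_list args (find_load_list args)

-- ===== LEMMAS AND PROOFS =====

-- a position matches iff its argument is the bare flag or carries the '--load-list=' prefix
def pvHit (arg : String) : Bool := arg == "--load-list" || PySem.Str.startswith arg "--load-list="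

-- the value both Python programs produce at a matching position k
def pvVal (args : List String) (k : Nat) (arg : String) : Option String :=
  if arg == "--load-list" then PySem.List.pyGet? args ((k : Int) + 1)
  else some (PySem.Str.slice arg (some 12) none)

-- enumerate(args) as an indexed map over List.range, so both ports talk about positions
theorem pv_enumerate_eq (args : List String) :
    PySem.List.enumerate args =
      (List.range args.length).map (fun (k : Nat) => ((k : Int), args.getD k "")) := by
  apply List.ext_getElem?
  intro k
  by_cases h : k < args.length
  · simp [PySem.List.getElem?_enumerate, List.getElem?_map, List.getElem?_range h,
      List.getElem?_eq_getElem h]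
  · have h' : args.length ≤ k := by omega
    simp [PySem.List.getElem?_enumerate, List.getElem?_map, List.getElem?_eq_none h',
      List.getElem?_eq_none (by simpa using h' : (List.range args.length).length ≤ k)]

-- A's fold over a list of positions yields the value of the LAST match (first match of the reverse)
theorem pv_foldl_char (args : List String) (l : List Nat) (acc : Option String) :
    l.foldl
      (fun load_list k =>
        let arg := args.getD k ""
        let load_list := if PySem.Str.startswith arg "--load-list=" then
            some (PySem.Str.slice arg (some 12) none) else load_list
        if arg == "--load-list" then PySem.List.pyGet? args ((k : Int) + 1) else load_list)
      acc
    = match l.reverse.find? (fun k => pvHit (args.getD k "")) with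
      | some k => pvVal args k (args.getD k "")
      | none => acc := by
  induction l generalizing acc with
  | nil => simp
  | cons x l ih =>
    rw [List.foldl_cons, ih]
    rw [List.reverse_cons, List.find?_append]
    clear ih
    cases hf : l.reverse.find? (fun k => pvHit (args.getD k "")) with
    | some k => simp
    | none =>
      simp only [Option.none_or]
      by_cases he : args.getD x "" = "--load-list"
      · simp_all [List.find?, pvHit, pvVal]
      · by_cases hs : PySem.Str.startswith (args.getD x "") "--load-list=" = true <;>
          simp_all [List.find?, pvHit, pvVal, beq_eq_decide]

-- B's countdown recursion yields the value of the first match scanning positions n-1 … 0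
theorem pv_altGo_char (args : List String) (n : Nat) (hn : n ≤ args.length) :
    find_load_list_altGo args n
    = match (List.range n).reverse.find? (fun k => pvHit (args.getD k "")) with
      | some k => pvVal args k (args.getD k "")
      | none => none := by
  induction n with
  | zero => simp [find_load_list_altGo]
  | succ n ih =>
    have hlt : n < args.length := by omega
    have hget : PySem.List.pyGet? args (n : Int) = some (args.getD n "") := by
      simp [PySem.List.pyGet?_natCast, List.getElem?_eq_getElem hlt]
    rw [List.range_succ, List.reverse_append]
    simp only [List.reverse_singleton, List.singleton_append]
    rw [find_load_list_altGo, hget]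
    by_cases he : args.getD n "" = "--load-list"
    · simp_all [List.find?, pvHit, pvVal]
    · by_cases hs : PySem.Str.startswith (args.getD n "") "--load-list=" = true
      · simp_all [List.find?, pvHit, pvVal]
      · rw [ih (by omega)]
        simp_all [List.find?, pvHit, pvVal, beq_eq_decide]

-- ===== VERDICT (by name: the statement is the Claim_ definition above) =====
theorem find_load_list_spec : Claim_equal_find_load_list := by
  intro args _ _
  unfold Spec_find_load_list find_load_list find_load_list_alt
  rw [pv_enumerate_eq, List.foldl_map, pv_foldl_char, pv_altGo_char args args.length le_rfl]
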